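-- pv_equiv track=rewrite | github.com/codeasier/gitcode-cli | tests/unit/commands/test_cli_gh_compat.py | _group_expected_commands
-- ===== SOURCE A (Python) =====
-- def _group_expected_commands(commands: dict[str, dict[str, object]]) -> dict[str, list[str]]:
--     grouped: dict[str, list[str]] = {}
--     for command_path, metadata in commands.items():
--         group = metadata["group"]
--         if command_path == group:
--             continue
--         grouped.setdefault(group, []).append(metadata["subcommand"])
--     return {group: sorted(set(subcommands)) for group, subcommands in grouped.items()}
-- ===== SOURCE B (Python) =====
-- def _group_expected_commands(commands: dict[str, dict[str, object]]) -> dict[str, list[str]]: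
--     pairs = [(md["group"], md["subcommand"])
--              for path, md in commands.items() if md["group"] != path]
--     order = []
--     for g, _ in pairs:
--         if g not in order:
--             order.append(g)
--     return {g: sorted({s for h, s in pairs if h == g}) for g in order}
-- ===== Notes on version B (the rewrite author's own statement) =====
-- stated objective: alternative
-- what changed: Instead of scattering subcommands into a dict-of-lists with setdefault and sorting each bucket, B flattens the commands to a (group, subcommand) pair list in one comprehension, records first-appearance group order explicitly, and builds each group's sorted deduplicated bucket by a per-group scan of the flat pair list.
import Mathlib
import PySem

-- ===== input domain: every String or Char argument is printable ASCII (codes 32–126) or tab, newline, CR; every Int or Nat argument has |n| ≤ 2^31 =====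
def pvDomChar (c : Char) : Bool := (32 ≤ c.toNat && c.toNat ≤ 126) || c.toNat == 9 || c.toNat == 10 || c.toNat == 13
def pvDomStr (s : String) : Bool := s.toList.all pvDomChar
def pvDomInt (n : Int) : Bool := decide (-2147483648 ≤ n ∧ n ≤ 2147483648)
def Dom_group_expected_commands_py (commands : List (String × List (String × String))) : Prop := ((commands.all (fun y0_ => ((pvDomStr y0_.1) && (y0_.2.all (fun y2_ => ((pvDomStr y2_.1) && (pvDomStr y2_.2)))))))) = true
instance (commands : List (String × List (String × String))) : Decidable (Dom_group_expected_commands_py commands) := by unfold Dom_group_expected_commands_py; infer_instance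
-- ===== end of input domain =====

-- B flattens the commands to a (group, subcommand) pair list, records first-appearance
-- group order explicitly, and builds each group's sorted deduplicated bucket by a
-- per-group scan of the flat pair list (objective: alternative decomposition, not faster).

-- ===== PORT A =====
-- metadata["key"]: first-match association-list lookup (none = KeyError)
def pvMdGet (md : List (String × String)) (k : String) : Option String :=
  (PySem.Dict.mk md).get? k

def group_expected_commands_py (commands : List (String × List (String × String))) : List (String × List String) :=
  let grouped : PySem.Dict String (List String) :=
    commands.foldl (fun grouped cm =>
      match pvMdGet cm.2 "group" with
      | none => grouped  -- Python raises KeyError here; excluded by Pre_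
      | some group =>
        if cm.1 = group then grouped
        else
          match pvMdGet cm.2 "subcommand" with
          | none => grouped  -- Python raises KeyError here; excluded by Pre_
          | some s => grouped.modify group [] (· ++ [s])) PySem.Dict.empty
  grouped.items.map (fun gs => (gs.1, PySem.List.sorted (PySem.Set.ofList gs.2) (fun x => x) false))

-- ===== PORT B =====
-- the flat (group, subcommand) pair list of B's first comprehension
def pvPairs (commands : List (String × List (String × String))) : List (String × String) :=
  commands.filterMap (fun cm =>
    match pvMdGet cm.2 "group" with
    | none => none  -- Python raises KeyError here; excluded by Pre_
    | some g =>
      if g ≠ cm.1 then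
        match pvMdGet cm.2 "subcommand" with
        | none => none  -- Python raises KeyError here; excluded by Pre_
        | some s => some (g, s)
      else none)

def group_expected_commands_py_alt (commands : List (String × List (String × String))) : List (String × List String) :=
  let pairs := pvPairs commands
  let order : List String :=
    pairs.foldl (fun order p => if p.1 ∈ order then order else order ++ [p.1]) []
  order.map (fun g =>
    (g, PySem.List.sorted
          (PySem.Set.ofList ((pairs.filter (fun q => q.1 == g)).map (·.2)))
          (fun x => x) false))

-- ===== PRECONDITION & SPEC =====
-- Pre_ excludes exactly the inputs where A raises KeyError: a metadata dict without a
-- "group" key, or without a "subcommand" key when the command path differs from its group.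
def Pre_group_expected_commands_py (commands : List (String × List (String × String))) : Prop :=
  (commands.all (fun cm =>
    match pvMdGet cm.2 "group" with
    | none => false
    | some g => (cm.1 == g) || (pvMdGet cm.2 "subcommand").isSome)) = true
instance (commands : List (String × List (String × String))) : Decidable (Pre_group_expected_commands_py commands) := by unfold Pre_group_expected_commands_py; infer_instance

def pvWitness_group_expected_commands_py : (List (String × List (String × String))) :=
  [("gc sub", [("group", "gc"), ("subcommand", "sub")]), ("gc", [("group", "gc")])]

def Spec_group_expected_commands_py (commands : List (String × List (String × String))) (out : List (String × List String)) : Prop := out = group_expected_commands_py_alt commands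
instance (commands : List (String × List (String × String))) (out : List (String × List String)) : Decidable (Spec_group_expected_commands_py commands out) := by unfold Spec_group_expected_commands_py; infer_instance

-- ===== CLAIM (what is proved, stated in full; the proofs are below) =====
def Claim_equal_group_expected_commands_py : Prop := ∀ (commands : List (String × List (String × String))), Dom_group_expected_commands_py commands → Pre_group_expected_commands_py commands → Spec_group_expected_commands_py commands (group_expected_commands_py commands)

-- ===== LEMMAS AND PROOFS =====

-- A's loop over commands equals the grouping fold over B's flat pair list.
theorem foldA_eq_foldl_pairs (commands : List (String × List (String × String)))
    (d : PySem.Dict String (List String))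
    (hpre : Pre_group_expected_commands_py commands) :
    commands.foldl (fun grouped cm =>
      match pvMdGet cm.2 "group" with
      | none => grouped
      | some group =>
        if cm.1 = group then grouped
        else
          match pvMdGet cm.2 "subcommand" with
          | none => grouped
          | some s => grouped.modify group [] (· ++ [s])) d
    = (pvPairs commands).foldl (fun d p => d.modify p.1 [] (· ++ [p.2])) d := by
  induction commands generalizing d with
  | nil => rfl
  | cons cm rest ih =>
    rw [Pre_group_expected_commands_py, List.all_cons, Bool.and_eq_true] at hpre
    have hpre' : Pre_group_expected_commands_py rest := hpre.2
    have hcm := hpre.1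
    cases hg : pvMdGet cm.2 "group" with
    | none => rw [hg] at hcm; simp at hcm
    | some g =>
      rw [hg] at hcm
      have h1 : (cm.1 == g) || (pvMdGet cm.2 "subcommand").isSome := hcm
      by_cases heq : cm.1 = g
      · subst heq
        simp only [List.foldl_cons, pvPairs, List.filterMap_cons, hg, ne_eq,
          not_true_eq_false, if_false]
        exact ih d hpre'
      · have hsub : (pvMdGet cm.2 "subcommand").isSome := by
          simp only [Bool.or_eq_true, beq_iff_eq] at h1
          rcases h1 with h | h
          · exact absurd h heq
          · exact h
        cases hs : pvMdGet cm.2 "subcommand" with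
        | none => rw [hs] at hsub; simp at hsub
        | some s =>
          have hne : g ≠ cm.1 := fun h => heq h.symm
          simp only [List.foldl_cons, pvPairs, List.filterMap_cons, hg, hs, if_neg heq, ne_eq, hne,
            not_false_eq_true, if_true]
          exact ih _ hpre'

-- items of a Nodup-keyed dict are its keys paired with their getD values.
theorem items_eq_keys_map_getD {ν : Type} (d : PySem.Dict String ν) (d0 : ν)
    (hnd : d.keys.Nodup) :
    d.items = d.keys.map (fun k => (k, d.getD k d0)) := by
  have hk : d.keys = d.items.map (·.1) := by simp only [PySem.Dict.keys]
  apply List.ext_getElem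
  · simp [hk]
  · intro i h1 h2
    have hmem : (d.items[i].1, d.items[i].2) ∈ d.items := by
      rw [Prod.mk.eta]; exact List.getElem_mem _
    have hkey : (d.keys.map (fun k => (k, d.getD k d0)))[i]
        = (d.items[i].1, d.getD d.items[i].1 d0) := by
      simp [hk]
    rw [hkey, PySem.Dict.getD_of_mem_items d hmem hnd d0]

-- B's explicit order loop builds set(groups) in first-appearance order.
theorem order_eq_ofList (ps : List (String × String)) (s : List String) :
    ps.foldl (fun order p => if p.1 ∈ order then order else order ++ [p.1]) s
    = (ps.map (·.1)).foldl PySem.Set.add s := by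
  induction ps generalizing s with
  | nil => rfl
  | cons p rest ih =>
    simp only [List.foldl_cons, List.map_cons]
    rw [ih]
    congr 1
    simp [PySem.Set.add]

-- ===== VERDICT (by name: the statement is the Claim_ definition above) =====
theorem group_expected_commands_py_spec : Claim_equal_group_expected_commands_py := by
  intro commands hdom hpre
  show group_expected_commands_py commands = group_expected_commands_py_alt commands
  unfold group_expected_commands_py group_expected_commands_py_alt
  dsimp only
  rw [foldA_eq_foldl_pairs commands PySem.Dict.empty hpre]
  set ps := pvPairs commands with hps
  have hnd : ((ps.foldl (fun d p => d.modify p.1 [] (· ++ [p.2])) PySem.Dict.empty)).keys.Nodup :=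
    PySem.Dict.nodup_keys_foldl_modify_key ps (·.1) [] (fun _ p => (· ++ [p.2])) PySem.Dict.empty
      (by simp)
  have hkeys : ((ps.foldl (fun d p => d.modify p.1 [] (· ++ [p.2])) PySem.Dict.empty)).keys
      = PySem.Set.ofList (ps.map (·.1)) := by
    rw [PySem.Dict.keys_foldl_modify_key]
    simp [PySem.Set.update, PySem.Set.ofList_eq_foldl, PySem.Dict.keys_empty]
  rw [items_eq_keys_map_getD _ [] hnd, hkeys, order_eq_ofList, ← PySem.Set.ofList_eq_foldl]
  rw [List.map_map]
  apply List.map_congr_left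
  intro g hg
  simp only [Function.comp]
  congr 1
  rw [PySem.Dict.getD_foldl_modify_append]
  simp [PySem.Dict.getD_empty]
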